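-- pv_equiv track=rewrite | github.com/0x-wzw/Kairos | engine/celestial_computations/fengshui.py | kua_number
-- ===== SOURCE A (Python) =====
-- def _reduce_to_single_digit(n: int) -> int:
--     """递归折至个位数（用于命卦计算）。"""
--     while n >= 10:
--         n = sum(int(d) for d in str(n))
--     return n
--
-- def kua_number(birth_year: int, gender: str = 'male') -> int:
--     """
--     根据出生年份计算命卦数 (1-9)。
--
--     Args:
--         birth_year: 出生年份（公元）
--         gender: 'male' | 'female'
--
--     Returns:
--         命卦数 1-9（5 寄 2/8）
--     """
--     year_sum = sum(int(d) for d in str(birth_year))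
--     base = _reduce_to_single_digit(year_sum)
--
--     if gender == 'male':
--         kua = 11 - base
--     else:
--         kua = 4 + base
--
--     kua = _reduce_to_single_digit(kua)
--
--     # 5 中宫寄位
--     if kua == 5:
--         return 2 if gender == 'male' else 8
--
--     return kua
-- ===== SOURCE B (Python) =====
-- def kua_number(birth_year: int, gender: str = 'male') -> int:
--     # Closed-form digital roots (1 + (n-1) % 9) instead of repeated digit-sum loops.
--     base = 0 if birth_year == 0 else 1 + (birth_year - 1) % 9
--     kua = 11 - base if gender == 'male' else 4 + base
--     kua = 0 if kua == 0 else 1 + (kua - 1) % 9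
--     if kua == 5:
--         return 2 if gender == 'male' else 8
--     return kua
-- ===== Notes on version B (the rewrite author's own statement) =====
-- stated objective: idiomatic
-- what changed: Replaces both string-digit-sum while-loop reductions with the closed-form digital root base = 0 if birth_year == 0 else 1 + (birth_year - 1) % 9 (and likewise for the second fold), eliminating all string conversion and looping.
import Mathlib
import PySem

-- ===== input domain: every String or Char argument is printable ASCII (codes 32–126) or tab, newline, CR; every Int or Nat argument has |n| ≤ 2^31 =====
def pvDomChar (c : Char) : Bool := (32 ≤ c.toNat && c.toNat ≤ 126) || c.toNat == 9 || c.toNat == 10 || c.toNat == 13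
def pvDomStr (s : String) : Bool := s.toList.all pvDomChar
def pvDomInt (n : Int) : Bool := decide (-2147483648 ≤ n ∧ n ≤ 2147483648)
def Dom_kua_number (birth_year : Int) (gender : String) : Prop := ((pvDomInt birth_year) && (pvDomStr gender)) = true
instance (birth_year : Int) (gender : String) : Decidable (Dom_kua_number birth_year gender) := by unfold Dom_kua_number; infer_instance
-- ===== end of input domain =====

-- B replaces A's repeated string-digit-sum while-loops by the closed-form digital root 1+(n-1)%9 (idiomatic arithmetic, no string conversion).


-- ===== PORT A =====
-- sum(int(d) for d in cs): adds int(d) per character; none exactly where Python's int(d) raises ValueError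
def pvStep (acc : Option Int) (c : Char) : Option Int :=
  match acc, PySem.Int.ofChars? [c] with
  | some a, some v => some (a + v)
  | _, _ => none

def pvIntSum? (cs : List Char) : Option Int := cs.foldl pvStep (some 0)

-- facts needed by kn_reduce's termination (cited in decreasing_by)
lemma pv_digitChar_val (d : Nat) (hd : d < 10) :
    PySem.Int.ofChars? [Nat.digitChar d] = some (d : Int) := by
  interval_cases d <;> decide

lemma pv_foldl_toDigitsCore (fuel : Nat) :
    ∀ (n : Nat) (ds : List Char) (a : Int), n < fuel →
      (Nat.toDigitsCore 10 fuel n ds).foldl pvStep (some a)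
        = ds.foldl pvStep (some (a + ((Nat.digits 10 n).sum : Int))) := by
  induction fuel with
  | zero => intro n ds a h; omega
  | succ f ih =>
    intro n ds a h
    rw [Nat.toDigitsCore]
    by_cases h0 : n / 10 = 0
    · simp only [h0, if_pos]
      have hlt : n % 10 < 10 := Nat.mod_lt _ (by omega)
      rw [List.foldl_cons, show pvStep (some a) ((n % 10).digitChar) = some (a + (n % 10 : Nat))
          from by simp [pvStep, pv_digitChar_val _ hlt]]
      by_cases hn : n = 0
      · simp [hn]
      · rw [Nat.digits_def' (by norm_num : 1 < 10) (Nat.pos_of_ne_zero hn), h0]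
        simp
    · simp only [h0, if_false]
      have hlt2 : n / 10 < f := by omega
      rw [ih (n / 10) _ a hlt2, List.foldl_cons,
          show pvStep (some (a + ((Nat.digits 10 (n / 10)).sum : Int))) ((n % 10).digitChar)
              = some (a + ((Nat.digits 10 (n / 10)).sum : Int) + (n % 10 : Nat))
            from by simp [pvStep, pv_digitChar_val _ (Nat.mod_lt _ (by omega))]]
      rw [Nat.digits_def' (by norm_num : 1 < 10) (by omega : 0 < n)]
      congr 1
      push_cast [List.sum_cons]
      ring

lemma pvIntSum_toDigits (n : Nat) :
    pvIntSum? (Nat.toDigits 10 n) = some ((Nat.digits 10 n).sum : Int) := by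
  unfold pvIntSum? Nat.toDigits
  rw [pv_foldl_toDigitsCore (n + 1) n [] 0 (Nat.lt_succ_self n)]
  simp

lemma pv_toChars_nonneg (n : Int) (h : 0 ≤ n) :
    PySem.Int.toChars n = Nat.toDigits 10 n.toNat := by
  simp [PySem.Int.toChars, not_lt.mpr h]

lemma pv_digitsum_lt (n : Nat) (h : 10 ≤ n) : (Nat.digits 10 n).sum < n := by
  rw [Nat.digits_def' (by norm_num : 1 < 10) (by omega : 0 < n)]
  have h1 := Nat.digit_sum_le 10 (n / 10)
  simp only [List.sum_cons]
  omega

lemma pv_kn_dec (n : Int) (h : 10 ≤ n) :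
    ((pvIntSum? (PySem.Int.toChars n)).getD 0).toNat < n.toNat := by
  rw [pv_toChars_nonneg n (by omega), pvIntSum_toDigits]
  have := pv_digitsum_lt n.toNat (by omega)
  simp only [Option.getD_some]
  omega

-- port of _reduce_to_single_digit: while n >= 10: n = sum(int(d) for d in str(n))
-- (inside the loop n ≥ 10, so every char of str(n) is a digit and int(d) never raises; getD 0 is exact there)
def kn_reduce (n : Int) : Int :=
  if h : 10 ≤ n then kn_reduce ((pvIntSum? (PySem.Int.toChars n)).getD 0) else n
termination_by n.toNat
decreasing_by exact pv_kn_dec n h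

def kua_number (birth_year : Int) (gender : String) : Int :=
  match pvIntSum? (PySem.Int.toChars birth_year) with
  | none => 0  -- Python raises ValueError here (str(birth_year) contains '-'); excluded by Pre_
  | some year_sum =>
    let base := kn_reduce year_sum
    let kua := if gender == "male" then 11 - base else 4 + base
    let kua2 := kn_reduce kua
    if kua2 == 5 then (if gender == "male" then 2 else 8) else kua2

-- ===== PORT B =====
def kua_number_alt (birth_year : Int) (gender : String) : Int :=
  let base := if birth_year == 0 then 0 else 1 + PySem.Int.mod (birth_year - 1) 9
  let kua := if gender == "male" then 11 - base else 4 + base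
  let kua2 := if kua == 0 then 0 else 1 + PySem.Int.mod (kua - 1) 9
  if kua2 == 5 then (if gender == "male" then 2 else 8) else kua2

-- ===== PRECONDITION & SPEC =====
-- Pre_ excludes negative years, on which A's sum(int(d) for d in str(birth_year)) hits '-' and raises ValueError
def Pre_kua_number (birth_year : Int) (gender : String) : Prop := 0 ≤ birth_year
instance (birth_year : Int) (gender : String) : Decidable (Pre_kua_number birth_year gender) := by unfold Pre_kua_number; infer_instance
def pvWitness_kua_number : Int × String := (1990, "male")

def Spec_kua_number (birth_year : Int) (gender : String) (out : Int) : Prop := out = kua_number_alt birth_year gender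
instance (birth_year : Int) (gender : String) (out : Int) : Decidable (Spec_kua_number birth_year gender out) := by unfold Spec_kua_number; infer_instance

-- ===== CLAIM (what is proved, stated in full; the proofs are below) =====
def Claim_equal_kua_number : Prop := ∀ (birth_year : Int) (gender : String), Dom_kua_number birth_year gender → Pre_kua_number birth_year gender → Spec_kua_number birth_year gender (kua_number birth_year gender)
-- ===== LEMMAS AND PROOFS =====

lemma pv_digitsum_pos (n : Nat) (h : 0 < n) : 0 < (Nat.digits 10 n).sum := by
  induction n using Nat.strong_induction_on with
  | _ n ih =>
    rw [Nat.digits_def' (by norm_num : 1 < 10) h]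
    simp only [List.sum_cons]
    by_cases hm : n % 10 = 0
    · have hd : 0 < n / 10 := by omega
      have := ih (n / 10) (by omega) hd
      omega
    · omega

-- kn_reduce computes the digital root 1 + (n-1) % 9 (Nat side)
lemma pv_kn_reduce_nat (m : Nat) :
    kn_reduce (m : Int) = if m = 0 then 0 else 1 + ((m - 1) % 9 : Nat) := by
  induction m using Nat.strong_induction_on with
  | _ m ih =>
    rw [kn_reduce]
    by_cases h10 : 10 ≤ (m : Int)
    · have hm10 : 10 ≤ m := by exact_mod_cast h10
      rw [dif_pos h10, pv_toChars_nonneg _ (by omega), pvIntSum_toDigits]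
      simp only [Int.toNat_natCast, Option.getD_some]
      set s := (Nat.digits 10 m).sum with hs
      have hlt : s < m := pv_digitsum_lt m hm10
      have hpos : 0 < s := pv_digitsum_pos m (by omega)
      have hmod : s % 9 = m % 9 := (Nat.modEq_nine_digits_sum m).symm
      rw [ih s hlt]
      have h1 : (s - 1) % 9 = (m - 1) % 9 := by omega
      rw [if_neg (by omega), if_neg (by omega), h1]
    · rw [dif_neg h10]
      have hm : m < 10 := by exact_mod_cast not_le.mp h10
      by_cases h0 : m = 0
      · simp [h0]
      · rw [if_neg h0]
        have : (m - 1) % 9 = m - 1 := Nat.mod_eq_of_lt (by omega)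
        rw [this]
        push_cast
        omega

-- the same, Int side, against B's Python-floor-mod expression
lemma pv_kn_reduce_int (k : Int) (h : 0 ≤ k) :
    kn_reduce k = if k = 0 then 0 else 1 + PySem.Int.mod (k - 1) 9 := by
  have hk : k = (k.toNat : Int) := by omega
  rw [PySem.Int.mod_eq_emod_of_pos (by norm_num : (0:Int) < 9),
      hk, pv_kn_reduce_nat k.toNat]
  by_cases h0 : k.toNat = 0
  · simp [h0]
  · rw [if_neg h0, if_neg (show ((k.toNat : Int)) ≠ 0 by exact_mod_cast h0)]
    omega

-- ===== VERDICT (by name: the statement is the Claim_ definition above) =====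
theorem kua_number_spec : Claim_equal_kua_number := by
  intro birth_year gender _ hpre
  unfold Spec_kua_number kua_number kua_number_alt
  have hpre' : (0:Int) ≤ birth_year := hpre
  rw [pv_toChars_nonneg _ hpre', pvIntSum_toDigits]
  simp only
  set N := birth_year.toNat with hN
  set s := (Nat.digits 10 N).sum with hs
  -- first reduce: kn_reduce s = B's base
  have hb0 : birth_year = (N : Int) := by omega
  have hbase : kn_reduce (s : Int)
      = (if birth_year == 0 then 0 else 1 + PySem.Int.mod (birth_year - 1) 9) := by
    rw [pv_kn_reduce_nat s]
    have hmod : s % 9 = N % 9 := (Nat.modEq_nine_digits_sum N).symm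
    by_cases h0 : N = 0
    · simp [h0, hs, hb0]
    · have hs0 : s ≠ 0 := by
        have := pv_digitsum_pos N (Nat.pos_of_ne_zero h0)
        omega
      rw [if_neg hs0, hb0]
      rw [if_neg (by simpa using (by exact_mod_cast h0 : (N:Int) ≠ 0)),
          PySem.Int.mod_eq_emod_of_pos (by norm_num : (0:Int) < 9)]
      omega
  rw [hbase]
  set base := (if birth_year == 0 then 0 else 1 + PySem.Int.mod (birth_year - 1) 9) with hbd
  -- bounds on base, so the second argument to kn_reduce is nonnegative
  have hbb : 0 ≤ base ∧ base ≤ 9 := by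
    rw [hbd]
    by_cases h0 : birth_year == 0
    · simp [h0]
    · rw [if_neg (by simpa using h0)]
      have h1 := PySem.Int.mod_nonneg (birth_year - 1) (by norm_num : (0:Int) < 9)
      have h2 := PySem.Int.mod_lt (birth_year - 1) (by norm_num : (0:Int) < 9)
      omega
  set kua := (if gender == "male" then 11 - base else 4 + base) with hkd
  have hkn : 0 ≤ kua := by
    rw [hkd]; by_cases hg : gender == "male" <;> simp [hg] <;> omega
  rw [pv_kn_reduce_int kua hkn]
  simp only [beq_iff_eq]
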